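-- pv_equiv track=rewrite | github.com/omercanb/character-conversation | main.py | get_dialoague_dict
-- ===== SOURCE A (Python) =====
-- from collections import defaultdict
--
-- def get_dialoague_dict(dialogue, characters):
--     dialogue_dict = defaultdict(lambda:[])
--     current_character = dialogue[0]
--     for line in dialogue:
--         if line in characters:
--             current_character = line
--             continue
--         dialogue_dict[current_character].append(line.strip())
--     return dialogue_dict
-- ===== SOURCE B (Python) =====
-- def get_dialoague_dict(dialogue, characters):
--     """Run-based scan: consume maximal runs of speaker lines (last one wins)
--     and maximal runs of dialogue lines (one dict touch per run)."""
--     cset = set(characters)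
--     n = len(dialogue)
--     current = dialogue[0]
--     result = {}
--     i = 0
--     while i < n:
--         if dialogue[i] in cset:
--             while i < n and dialogue[i] in cset:
--                 current = dialogue[i]
--                 i += 1
--         else:
--             bucket = result.setdefault(current, [])
--             while i < n and dialogue[i] not in cset:
--                 bucket.append(dialogue[i].strip())
--                 i += 1
--     return result
-- ===== Notes on version B (the rewrite author's own statement) =====
-- stated objective: faster
-- what changed: Replaces the per-line fold over a defaultdict with a run-based two-pointer scan: maximal runs of consecutive speaker lines (last wins) and dialogue lines (one dict access per run) are consumed by nested while loops, with membership via a prebuilt set instead of scanning the characters list per line.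
-- outside the precondition, e.g. on get_dialoague_dict([], []): A raises IndexError, B raises IndexError
import Mathlib
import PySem

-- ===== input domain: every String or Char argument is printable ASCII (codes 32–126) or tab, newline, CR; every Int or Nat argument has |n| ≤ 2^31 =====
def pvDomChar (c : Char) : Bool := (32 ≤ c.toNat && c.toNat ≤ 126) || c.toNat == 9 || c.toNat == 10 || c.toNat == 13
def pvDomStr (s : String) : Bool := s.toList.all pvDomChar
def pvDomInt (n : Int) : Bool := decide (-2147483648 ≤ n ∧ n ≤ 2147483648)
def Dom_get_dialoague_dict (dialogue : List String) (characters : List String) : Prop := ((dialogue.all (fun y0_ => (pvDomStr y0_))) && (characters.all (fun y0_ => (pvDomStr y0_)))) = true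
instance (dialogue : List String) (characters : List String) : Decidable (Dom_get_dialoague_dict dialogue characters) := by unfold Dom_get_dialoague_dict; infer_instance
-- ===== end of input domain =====

-- B replaces A's per-line fold with a run-based scan (nested loops over maximal
-- speaker/dialogue runs, one dict access per dialogue run, set membership);
-- objective: faster (set membership vs per-line list scan, measured by the timing
-- run). Equivalence is about the RETURN value (A returns a defaultdict, B a
-- plain dict; both are the same association list).

-- ===== PORT A =====
-- loop body of A: state = (dialogue_dict, current_character)
def pvStepA (characters : List String)
    (st : PySem.Dict String (List String) × String) (line : String) :
    PySem.Dict String (List String) × String :=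
  if characters.contains line then (st.1, line)
  else (st.1.modify st.2 [] (· ++ [PySem.Str.strip line]), st.2)
  -- defaultdict: dialogue_dict[current].append(line.strip()) = modify with default []

def get_dialoague_dict (dialogue : List String) (characters : List String) :
    List (String × List String) :=
  match PySem.List.pyGet? dialogue 0 with
  | none => []   -- dialogue[0] raises IndexError here; excluded by Pre_
  | some c0 => (dialogue.foldl (pvStepA characters) (PySem.Dict.empty, c0)).1.items

-- ===== PORT B =====
-- inner while loop 1: consume a maximal run of speaker lines, last one wins
def pvSpeakRun (cs : PySem.Set String) (current : String) :
    List String → String × List String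
  | [] => (current, [])
  | x :: rest =>
    if cs.contains x then pvSpeakRun cs x rest else (current, x :: rest)

-- inner while loop 2: consume a maximal run of non-speaker lines, collecting strips
def pvDiaRun (cs : PySem.Set String) : List String → List String × List String
  | [] => ([], [])
  | x :: rest =>
    if cs.contains x then ([], x :: rest)
    else
      let r := pvDiaRun cs rest
      (PySem.Str.strip x :: r.1, r.2)

theorem pvSpeakRun_len (cs : PySem.Set String) :
    ∀ (xs : List String) (c : String), (pvSpeakRun cs c xs).2.length ≤ xs.length := by
  intro xs
  induction xs with
  | nil => intro c; simp [pvSpeakRun]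
  | cons x rest ih =>
    intro c
    simp only [pvSpeakRun]
    split
    · exact le_trans (ih x) (Nat.le_succ _)
    · simp

theorem pvDiaRun_len (cs : PySem.Set String) :
    ∀ (xs : List String), (pvDiaRun cs xs).2.length ≤ xs.length := by
  intro xs
  induction xs with
  | nil => simp [pvDiaRun]
  | cons x rest ih =>
    simp only [pvDiaRun]
    split
    · simp
    · exact le_trans ih (Nat.le_succ _)

-- outer while loop of B
def pvAltGo (cs : PySem.Set String) (current : String)
    (d : PySem.Dict String (List String)) :
    List String → PySem.Dict String (List String)
  | [] => d
  | x :: rest =>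
    if cs.contains x then
      let r := pvSpeakRun cs x rest
      pvAltGo cs r.1 d r.2
    else
      let r := pvDiaRun cs rest
      -- setdefault + per-line bucket.append over the run = one modify with the run's strips
      pvAltGo cs current (d.modify current [] (· ++ (PySem.Str.strip x :: r.1))) r.2
  termination_by xs => xs.length
  decreasing_by
  · exact Nat.lt_succ_of_le (pvSpeakRun_len cs rest x)
  · exact Nat.lt_succ_of_le (pvDiaRun_len cs rest)

def get_dialoague_dict_alt (dialogue : List String) (characters : List String) :
    List (String × List String) :=
  match PySem.List.pyGet? dialogue 0 with
  | none => []   -- dialogue[0] raises IndexError here; excluded by Pre_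
  | some c0 => (pvAltGo (PySem.Set.ofList characters) c0 PySem.Dict.empty dialogue).items

-- ===== PRECONDITION & SPEC =====
-- Pre_ excludes only the empty dialogue list, on which A raises IndexError at dialogue[0].
def Pre_get_dialoague_dict (dialogue : List String) (characters : List String) : Prop :=
  dialogue ≠ []
instance (dialogue : List String) (characters : List String) :
    Decidable (Pre_get_dialoague_dict dialogue characters) := by
  unfold Pre_get_dialoague_dict; infer_instance

def pvWitness_get_dialoague_dict : List String × List String :=
  (["Alice", " hi there ", "Bob", "ok"], ["Alice", "Bob"])

def Spec_get_dialoague_dict (dialogue : List String) (characters : List String)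
    (out : List (String × List String)) : Prop :=
  out = get_dialoague_dict_alt dialogue characters
instance (dialogue : List String) (characters : List String)
    (out : List (String × List String)) :
    Decidable (Spec_get_dialoague_dict dialogue characters out) := by
  unfold Spec_get_dialoague_dict; infer_instance

-- ===== CLAIM (what is proved, stated in full; the proofs are below) =====
def Claim_equal_get_dialoague_dict : Prop :=
  ∀ (dialogue : List String) (characters : List String),
    Dom_get_dialoague_dict dialogue characters →
    Pre_get_dialoague_dict dialogue characters →
    Spec_get_dialoague_dict dialogue characters (get_dialoague_dict dialogue characters)

-- ===== LEMMAS AND PROOFS =====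

theorem pvSetContains_iff (ch : List String) (x : String) :
    (PySem.Set.ofList ch).contains x = true ↔ x ∈ ch := by
  simp [PySem.Set.contains]

theorem pvModify_modify (d : PySem.Dict String (List String)) (k : String)
    (f g : List String → List String) :
    (d.modify k [] f).modify k [] g = d.modify k [] (fun v => g (f v)) := by
  simp [PySem.Dict.modify, PySem.Dict.insert_insert_self]

-- folding A's step over a maximal speaker run only updates the current character
theorem pvSpeak_fold (ch : List String) :
    ∀ (xs : List String) (c : String) (d : PySem.Dict String (List String)),
      List.foldl (pvStepA ch) (d, c) xs =
      List.foldl (pvStepA ch)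
        (d, (pvSpeakRun (PySem.Set.ofList ch) c xs).1)
        (pvSpeakRun (PySem.Set.ofList ch) c xs).2 := by
  intro xs
  induction xs with
  | nil => intro c d; simp [pvSpeakRun]
  | cons x rest ih =>
    intro c d
    by_cases hx : x ∈ ch
    · have hstep : pvStepA ch (d, c) x = (d, x) := by simp [pvStepA, hx]
      simp only [pvSpeakRun, pvSetContains_iff ch x, hx, if_true, List.foldl_cons, hstep]
      exact ih x d
    · simp [pvSpeakRun, hx]

-- folding A's step over a maximal dialogue run accumulates its strips in one bucket
theorem pvDia_fold (ch : List String) :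
    ∀ (xs : List String) (c : String) (d : PySem.Dict String (List String))
      (f : List String → List String),
      List.foldl (pvStepA ch) (d.modify c [] f, c) xs =
      List.foldl (pvStepA ch)
        (d.modify c [] (fun v => f v ++ (pvDiaRun (PySem.Set.ofList ch) xs).1), c)
        (pvDiaRun (PySem.Set.ofList ch) xs).2 := by
  intro xs
  induction xs with
  | nil => intro c d f; simp [pvDiaRun]
  | cons x rest ih =>
    intro c d f
    by_cases hx : x ∈ ch
    · simp [pvDiaRun, hx]
    · have hstep : pvStepA ch (d.modify c [] f, c) x =
          ((d.modify c [] f).modify c [] (· ++ [PySem.Str.strip x]), c) := by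
        simp [pvStepA, hx]
      simp only [pvDiaRun, pvSetContains_iff ch x, hx, if_false, List.foldl_cons, hstep,
        pvModify_modify]
      rw [ih c d (fun v => f v ++ [PySem.Str.strip x])]
      have hfun : (fun v => (fun v => f v ++ [PySem.Str.strip x]) v ++
            (pvDiaRun (PySem.Set.ofList ch) rest).1) =
          (fun v => f v ++ PySem.Str.strip x :: (pvDiaRun (PySem.Set.ofList ch) rest).1) := by
        funext v
        simp
      rw [hfun]

theorem pvMain (ch : List String) :
    ∀ (c : String) (d : PySem.Dict String (List String)) (xs : List String),
      pvAltGo (PySem.Set.ofList ch) c d xs =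
      (List.foldl (pvStepA ch) (d, c) xs).1 := by
  intro c d xs
  induction c, d, xs using pvAltGo.induct (cs := PySem.Set.ofList ch) with
  | case1 c d => simp [pvAltGo]
  | case2 c d x rest hx r ih =>
    have hx' : x ∈ ch := (pvSetContains_iff ch x).mp hx
    have hstep : pvStepA ch (d, c) x = (d, x) := by simp [pvStepA, hx']
    simp only [pvAltGo, hx, if_true]
    rw [ih, List.foldl_cons, hstep, pvSpeak_fold ch rest x d]
  | case3 c d x rest hx r ih =>
    have hx' : ¬ x ∈ ch := fun h => hx ((pvSetContains_iff ch x).mpr h)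
    have hstep : pvStepA ch (d, c) x =
        (d.modify c [] (· ++ [PySem.Str.strip x]), c) := by simp [pvStepA, hx']
    simp only [pvAltGo, hx]
    rw [ih, List.foldl_cons, hstep,
      pvDia_fold ch rest c d (· ++ [PySem.Str.strip x])]
    have hfun : (fun v => (v ++ [PySem.Str.strip x]) ++
          (pvDiaRun (PySem.Set.ofList ch) rest).1) =
        (fun v => v ++ PySem.Str.strip x :: (pvDiaRun (PySem.Set.ofList ch) rest).1) := by
      funext v
      simp
    simp only [hfun]
    simp [r]

-- ===== VERDICT (by name: the statement is the Claim_ definition above) =====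
theorem get_dialoague_dict_spec : Claim_equal_get_dialoague_dict := by
  intro dialogue characters _ hpre
  unfold Spec_get_dialoague_dict get_dialoague_dict get_dialoague_dict_alt
  cases dialogue with
  | nil => exact absurd rfl hpre
  | cons h t =>
    rw [PySem.List.pyGet?_zero_cons]
    exact congrArg PySem.Dict.items (pvMain characters h PySem.Dict.empty (h :: t)).symm
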